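-- pv_equiv track=rewrite | github.com/AIVIETNAM-Hub/STER-VLM-Spatio-Temporal-With-Enhanced-Reference-Vision-Language-Models | src_cleaned/utils/choose_prompt.py | get_prompt_temporal_pedestrian
-- ===== SOURCE A (Python) =====
-- def get_prompt_temporal_pedestrian(image_len, phase):
--     prompt = ""
--     if image_len > 0:
--         for _ in range(image_len):
--             prompt += "<image>\n"
--
--     if phase == "0": # ------------------------------------- phase 0 ------------------------------------
--         prompt += """[task:caption-PRERECOGNITION]
-- You are a traffic understanding model analyzing a traffic-related image, enriched with 3D scene reconstructions and 3D gaze information. Focus on the behaviour and spatial context around the pedestrian (in the green box and/or a magenta-color arrow indicating pedestrian's gaze if there is one) and the vechicle (in the red box). **Alert**: If the bounding boxes are not clear, focus on the pedestrain and the vehicle that nearest together.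
-- Tags:[gaze3d] this tag will tell you that you can use the magenta-color arrow indicating pedestrian's gaze (if there is one) as additional visual information to give out decision.
--
-- This is the **PRERECOGNITION** phase, where the timing is before the start of an environment awareness(crosswalks, traffic signals, vehicles, etc).
-- Use the following detailed aspects to guide your analysis:
-- 1. Body orientation[gaze3d]: diagonal, straight, or perpendicular to the vehicle; moving in the same or opposite direction; to the left, right, or center.
-- 2. Position[gaze3d]: in front of, behind, or beside the vehicle; directly or diagonally; relative or adjacent.
-- 3. Line of sight[gaze3d]: where the pedestrian is looking—direction of travel, crossing destination, nearby vehicles, objects like phones or the road.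
-- 4. Visual state[gaze3d]: e.g., scanning the scene, eyes closed, attentive.
-- 5. Action: e.g., walking, standing, crossing, squatting, falling, rushing, Collision, thrown back
-- 6. Direction and speed[gaze3d]: where and how fast the pedestrian is moving.
-- 7. Fine-grained action[gaze3d]: Focus on the action type(cross, fall, rush, travel), any Modifier / Location Detail(prohibited place, diagonally, near moving/parked vehicle, near but not on crosswalk, ignoring traffic signal, backward, forward, in car lane,...)
-- 8. Pedestrian awareness[gaze3d]: does the pedestrian notice the vehicle?
--
-- Your output caption should be around 2-4 concises sentences."""
--     elif phase == "1": # ------------------------------------- phase 1 ------------------------------------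
--         prompt += """[task:caption-RECOGNITION]
-- You are a traffic understanding model analyzing a traffic-related image, enriched with 3D scene reconstructions and 3D gaze information. Focus on the behaviour and spatial context around the pedestrian (in the green box and/or a magenta-color arrow indicating pedestrian's gaze if there is one) and the vechicle (in the red box). **Alert**: If the bounding boxes are not clear, focus on the pedestrain and the vehicle that nearest together.
-- Tags:[gaze3d] this tag will tell you that you can use the magenta-color arrow indicating pedestrian's gaze (if there is one) as additional visual information to give out decision.
--
-- This is the **RECOGNITION** phase, where the timing is from the start of the environment awareness(crosswalks, traffic signals, vehicles, etc), until a judgement is made. There should be some awareness clues of the pedestrian.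
-- Use the following detailed aspects to guide your analysis:
-- 1. Body orientation[gaze3d]: diagonal, straight, or perpendicular to the vehicle; moving in the same or opposite direction; to the left, right, or center.
-- 2. Position[gaze3d]: in front of, behind, or beside the vehicle; directly or diagonally; relative or adjacent.
-- 3. Line of sight[gaze3d]: where the pedestrian is looking—direction of travel, crossing destination, nearby vehicles, objects like phones or the road.
-- 4. Visual state[gaze3d]: e.g., scanning the scene, eyes closed, attentive.
-- 5. Action: e.g., walking, standing, crossing, squatting, falling, rushing, Collision, thrown back
-- 6. Direction and speed[gaze3d]: where and how fast the pedestrian is moving.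
-- 7. Fine-grained action[gaze3d]: Focus on the action type(cross, fall, rush, travel), any Modifier / Location Detail(prohibited place, diagonally, near moving/parked vehicle, near but not on crosswalk, ignoring traffic signal, backward, forward, in car lane,...)
-- 8. Pedestrian awareness[gaze3d]: does the pedestrian notice the vehicle?
--
-- Your output caption should be around 2-4 concises sentences."""
--     elif phase == "2":  # ------------------------------------- phase 2 ------------------------------------
--         prompt += """[task:caption-JUDGEMENT]
-- You are a traffic understanding model analyzing a traffic-related image, enriched with 3D scene reconstructions and 3D gaze information. Focus on the behaviour and spatial context around the pedestrian (in the green box and/or a magenta-color arrow indicating pedestrian's gaze if there is one) and the vechicle (in the red box). **Alert**: If the bounding boxes are not clear, focus on the pedestrain and the vehicle that nearest together.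
-- Tags:[gaze3d] this tag will tell you that you can use the magenta-color arrow indicating pedestrian's gaze (if there is one) as additional visual information to give out decision.
--
-- This is the **JUDGEMENT** phase. In principle, it is the moment from which environmental awareness is completed until the start of an action. The pedestrian should be fully awareness of the surrounding situation.
-- Use the following detailed aspects to guide your analysis:
-- 1. Body orientation[gaze3d]: diagonal, straight, or perpendicular to the vehicle; moving in the same or opposite direction; to the left, right, or center.
-- 2. Position[gaze3d]: in front of, behind, or beside the vehicle; directly or diagonally; relative or adjacent.
-- 3. Line of sight[gaze3d]: where the pedestrian is looking—direction of travel, crossing destination, nearby vehicles, objects like phones or the road.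
-- 4. Visual state[gaze3d]: e.g., scanning the scene, eyes closed, attentive.
-- 5. Action: e.g., walking, standing, crossing, squatting, falling, rushing, Collision, thrown back
-- 6. Direction and speed[gaze3d]: where and how fast the pedestrian is moving.
-- 7. Fine-grained action[gaze3d]: Focus on the action type(cross, fall, rush, travel), any Modifier / Location Detail(prohibited place, diagonally, near moving/parked vehicle, near but not on crosswalk, ignoring traffic signal, backward, forward, in car lane,...)
-- 8. Pedestrian awareness[gaze3d]: does the pedestrian notice the vehicle?
--
-- Your output caption should be around 2-4 concises sentences."""
--     elif phase == "3":  # ------------------------------------- phase 3 ------------------------------------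
--         prompt += """[task:caption-ACTION]
-- You are a traffic understanding model analyzing a traffic-related image, enriched with 3D scene reconstructions and 3D gaze information. Focus on the behaviour and spatial context around the pedestrian (in the green box and/or a magenta-color arrow indicating pedestrian's gaze if there is one) and the vechicle (in the red box). **Alert**: If the bounding boxes are not clear, focus on the pedestrain and the vehicle that nearest together.
-- Tags:[gaze3d] this tag will tell you that you can use the magenta-color arrow indicating pedestrian's gaze (if there is one) as additional visual information to give out decision.
--
-- This is the **ACTION** phase. In principle, this is the start moment of any part of the body of the pedestrian(eye and ears) up to the time a result(e.g, collision) occurs. The action should be clear to recognize.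
-- Use the following detailed aspects to guide your analysis:
-- 1. Body orientation[gaze3d]: diagonal, straight, or perpendicular to the vehicle; moving in the same or opposite direction; to the left, right, or center.
-- 2. Position[gaze3d]: in front of, behind, or beside the vehicle; directly or diagonally; relative or adjacent.
-- 3. Line of sight[gaze3d]: where the pedestrian is looking—direction of travel, crossing destination, nearby vehicles, objects like phones or the road.
-- 4. Visual state[gaze3d]: e.g., scanning the scene, eyes closed, attentive.
-- 5. Action: e.g., walking, standing, crossing, squatting, falling, rushing, Collision, thrown back
-- 6. Direction and speed[gaze3d]: where and how fast the pedestrian is moving.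
-- 7. Fine-grained action[gaze3d]: Focus on the action type(cross, fall, rush, travel), any Modifier / Location Detail(prohibited place, diagonally, near moving/parked vehicle, near but not on crosswalk, ignoring traffic signal, backward, forward, in car lane,...)
-- 8. Pedestrian awareness[gaze3d]: does the pedestrian notice the vehicle?
--
-- Your output caption should be around 2-4 concises sentences."""
--     else:  # ------------------------------------- phase 4 ------------------------------------
--         prompt += """[task:caption-AVOIDANCE]
-- You are a traffic understanding model analyzing a traffic-related image, enriched with 3D scene reconstructions and 3D gaze information. Focus on the behaviour and spatial context around the pedestrian (in the green box and/or a magenta-color arrow indicating pedestrian's gaze if there is one) and the vechicle (in the red box). **Alert**: If the bounding boxes are not clear, focus on the pedestrain and the vehicle that nearest together.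
-- Tags:[gaze3d] this tag will tell you that you can use the magenta-color arrow indicating pedestrian's gaze (if there is one) as additional visual information to give out decision.
--
-- This is the **AVOIDANCE** phase. In principle, this is the time after avoidability is clear until the time of avoidance happened or failure to avoid.
-- Use the following detailed aspects to guide your analysis:
-- 1. Body orientation[gaze3d]: diagonal, straight, or perpendicular to the vehicle; moving in the same or opposite direction; to the left, right, or center.
-- 2. Position[gaze3d]: in front of, behind, or beside the vehicle; directly or diagonally; relative or adjacent.
-- 3. Line of sight[gaze3d]: where the pedestrian is looking—direction of travel, crossing destination, nearby vehicles, objects like phones or the road.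
-- 4. Visual state[gaze3d]: e.g., scanning the scene, eyes closed, attentive.
-- 5. Action: e.g., walking, standing, crossing, squatting, falling, rushing, Collision, thrown back
-- 6. Direction and speed[gaze3d]: where and how fast the pedestrian is moving.
-- 7. Fine-grained action[gaze3d]: Focus on the action type(cross, fall, rush, travel), any Modifier / Location Detail(prohibited place, diagonally, near moving/parked vehicle, near but not on crosswalk, ignoring traffic signal, backward, forward, in car lane,...)
-- 8. Pedestrian awareness[gaze3d]: does the pedestrian notice the vehicle?
--
-- Your output caption should be around 2-4 concises sentences. """
--     return prompt
-- ===== SOURCE B (Python) =====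
-- # B: the whole prompt is ONE "\n".join over a flat line list: image_len copies of
-- # "<image>" followed by the 16 body lines, which are a fixed line table with three
-- # phase-dependent slots (label, description, tail) looked up once. No loop, no
-- # if/elif chain, no string repetition or incremental concatenation.
--
-- _COMMON = [
--     "You are a traffic understanding model analyzing a traffic-related image, enriched with 3D scene reconstructions and 3D gaze information. Focus on the behaviour and spatial context around the pedestrian (in the green box and/or a magenta-color arrow indicating pedestrian's gaze if there is one) and the vechicle (in the red box). **Alert**: If the bounding boxes are not clear, focus on the pedestrain and the vehicle that nearest together.",
--     "Tags:[gaze3d] this tag will tell you that you can use the magenta-color arrow indicating pedestrian's gaze (if there is one) as additional visual information to give out decision.",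
-- ]
--
-- _ASPECTS = [
--     "Use the following detailed aspects to guide your analysis:",
--     "1. Body orientation[gaze3d]: diagonal, straight, or perpendicular to the vehicle; moving in the same or opposite direction; to the left, right, or center. ",
--     "2. Position[gaze3d]: in front of, behind, or beside the vehicle; directly or diagonally; relative or adjacent.",
--     "3. Line of sight[gaze3d]: where the pedestrian is looking\u2014direction of travel, crossing destination, nearby vehicles, objects like phones or the road.",
--     "4. Visual state[gaze3d]: e.g., scanning the scene, eyes closed, attentive.",
--     "5. Action: e.g., walking, standing, crossing, squatting, falling, rushing, Collision, thrown back",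
--     "6. Direction and speed[gaze3d]: where and how fast the pedestrian is moving.",
--     "7. Fine-grained action[gaze3d]: Focus on the action type(cross, fall, rush, travel), any Modifier / Location Detail(prohibited place, diagonally, near moving/parked vehicle, near but not on crosswalk, ignoring traffic signal, backward, forward, in car lane,...)",
--     "8. Pedestrian awareness[gaze3d]: does the pedestrian notice the vehicle? ",
-- ]
--
-- _FINAL = "Your output caption should be around 2-4 concises sentences."
--
-- _PHASES = {
--     "0": ("PRERECOGNITION",
--         ", where the timing is before the start of an environment awareness(crosswalks, traffic signals, vehicles, etc). ", ""),
--     "1": ("RECOGNITION",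
--         ", where the timing is from the start of the environment awareness(crosswalks, traffic signals, vehicles, etc), until a judgement is made. There should be some awareness clues of the pedestrian.", ""),
--     "2": ("JUDGEMENT",
--         ". In principle, it is the moment from which environmental awareness is completed until the start of an action. The pedestrian should be fully awareness of the surrounding situation.", ""),
--     "3": ("ACTION",
--         ". In principle, this is the start moment of any part of the body of the pedestrian(eye and ears) up to the time a result(e.g, collision) occurs. The action should be clear to recognize.", ""),
-- }
--
-- _DEFAULT = ("AVOIDANCE",
--     ". In principle, this is the time after avoidability is clear until the time of avoidance happened or failure to avoid.", " ")
--
--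
-- def get_prompt_temporal_pedestrian(image_len, phase):
--     label, desc, tail = _PHASES.get(phase, _DEFAULT)
--     lines = (
--         ["<image>"] * image_len
--         + ["[task:caption-" + label + "]"]
--         + _COMMON
--         + ["", "This is the **" + label + "** phase" + desc]
--         + _ASPECTS
--         + ["", _FINAL + tail]
--     )
--     return "\n".join(lines)
-- ===== Notes on version B (the rewrite author's own statement) =====
-- stated objective: simpler
-- what changed: B builds the whole prompt with a single "\n".join over a flat line list (image_len copies of "<image>" followed by 16 body lines from a fixed line table with three phase-keyed slots: label, description, tail), replacing A's counting += loop and its five-way branch over five full prompt literals.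
import Mathlib
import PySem

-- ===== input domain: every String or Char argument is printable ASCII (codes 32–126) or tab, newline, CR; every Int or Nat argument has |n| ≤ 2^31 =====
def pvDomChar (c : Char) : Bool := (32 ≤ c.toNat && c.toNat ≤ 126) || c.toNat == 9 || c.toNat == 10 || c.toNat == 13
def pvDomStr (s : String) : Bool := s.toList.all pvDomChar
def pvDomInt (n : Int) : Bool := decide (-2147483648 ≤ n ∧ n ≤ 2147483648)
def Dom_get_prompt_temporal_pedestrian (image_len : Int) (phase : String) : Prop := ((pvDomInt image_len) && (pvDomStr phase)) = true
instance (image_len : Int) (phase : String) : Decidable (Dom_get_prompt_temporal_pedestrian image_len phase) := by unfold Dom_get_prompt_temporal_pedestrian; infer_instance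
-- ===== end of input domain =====

-- B assembles the whole prompt with ONE "\n".join over a flat line list (image_len copies
-- of "<image>" followed by 16 body lines from a fixed line table with three phase-keyed
-- slots), instead of A's counting += loop and five-way branch over full prompt literals
-- (objective: simpler).
-- NOTE: every multi-line Python string literal is written below as a concatenation of
-- piece-sized Lean literals with the same total value (kernel-checkable formatting only).

-- ===== PORT A =====
-- A's five complete prompt bodies, verbatim (chunked literals).
def pvBody0 : String :=
  "[task:caption-" ++
  "PRERECOGNITION" ++
  "]" ++
  "\n" ++
  "You are a traffic understanding model analyzing a traffic-related image, enriched with 3D scene reco" ++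
  "nstructions and 3D gaze information. Focus on the behaviour and spatial context around the pedestria" ++
  "n (in the green box and/or a magenta-color arrow indicating pedestrian's gaze if there is one) and t" ++
  "he vechicle (in the red box). **Alert**: If the bounding boxes are not clear, focus on the pedestrai" ++
  "n and the vehicle that nearest together." ++
  "\n" ++
  "Tags:[gaze3d] this tag will tell you that you can use the magenta-color arrow indicating pedestrian'" ++
  "s gaze (if there is one) as additional visual information to give out decision." ++
  "\n" ++
  "" ++
  "\n" ++
  "This is the **" ++
  "PRERECOGNITION" ++
  "** phase" ++
  ", where the timing is before the start of an environment awareness(crosswalks, traffic signals, vehi" ++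
  "cles, etc). " ++
  "\n" ++
  "Use the following detailed aspects to guide your analysis:" ++
  "\n" ++
  "1. Body orientation[gaze3d]: diagonal, straight, or perpendicular to the vehicle; moving in the same" ++
  " or opposite direction; to the left, right, or center. " ++
  "\n" ++
  "2. Position[gaze3d]: in front of, behind, or beside the vehicle; directly or diagonally; relative or" ++
  " adjacent." ++
  "\n" ++
  "3. Line of sight[gaze3d]: where the pedestrian is looking—direction of travel, crossing destination," ++
  " nearby vehicles, objects like phones or the road." ++
  "\n" ++
  "4. Visual state[gaze3d]: e.g., scanning the scene, eyes closed, attentive." ++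
  "\n" ++
  "5. Action: e.g., walking, standing, crossing, squatting, falling, rushing, Collision, thrown back" ++
  "\n" ++
  "6. Direction and speed[gaze3d]: where and how fast the pedestrian is moving." ++
  "\n" ++
  "7. Fine-grained action[gaze3d]: Focus on the action type(cross, fall, rush, travel), any Modifier / " ++
  "Location Detail(prohibited place, diagonally, near moving/parked vehicle, near but not on crosswalk," ++
  " ignoring traffic signal, backward, forward, in car lane,...)" ++
  "\n" ++
  "8. Pedestrian awareness[gaze3d]: does the pedestrian notice the vehicle? " ++
  "\n" ++
  "" ++
  "\n" ++
  "Your output caption should be around 2-4 concises sentences."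

def pvBody1 : String :=
  "[task:caption-" ++
  "RECOGNITION" ++
  "]" ++
  "\n" ++
  "You are a traffic understanding model analyzing a traffic-related image, enriched with 3D scene reco" ++
  "nstructions and 3D gaze information. Focus on the behaviour and spatial context around the pedestria" ++
  "n (in the green box and/or a magenta-color arrow indicating pedestrian's gaze if there is one) and t" ++
  "he vechicle (in the red box). **Alert**: If the bounding boxes are not clear, focus on the pedestrai" ++
  "n and the vehicle that nearest together." ++
  "\n" ++
  "Tags:[gaze3d] this tag will tell you that you can use the magenta-color arrow indicating pedestrian'" ++
  "s gaze (if there is one) as additional visual information to give out decision." ++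
  "\n" ++
  "" ++
  "\n" ++
  "This is the **" ++
  "RECOGNITION" ++
  "** phase" ++
  ", where the timing is from the start of the environment awareness(crosswalks, traffic signals, vehic" ++
  "les, etc), until a judgement is made. There should be some awareness clues of the pedestrian." ++
  "\n" ++
  "Use the following detailed aspects to guide your analysis:" ++
  "\n" ++
  "1. Body orientation[gaze3d]: diagonal, straight, or perpendicular to the vehicle; moving in the same" ++
  " or opposite direction; to the left, right, or center. " ++
  "\n" ++
  "2. Position[gaze3d]: in front of, behind, or beside the vehicle; directly or diagonally; relative or" ++
  " adjacent." ++
  "\n" ++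
  "3. Line of sight[gaze3d]: where the pedestrian is looking—direction of travel, crossing destination," ++
  " nearby vehicles, objects like phones or the road." ++
  "\n" ++
  "4. Visual state[gaze3d]: e.g., scanning the scene, eyes closed, attentive." ++
  "\n" ++
  "5. Action: e.g., walking, standing, crossing, squatting, falling, rushing, Collision, thrown back" ++
  "\n" ++
  "6. Direction and speed[gaze3d]: where and how fast the pedestrian is moving." ++
  "\n" ++
  "7. Fine-grained action[gaze3d]: Focus on the action type(cross, fall, rush, travel), any Modifier / " ++
  "Location Detail(prohibited place, diagonally, near moving/parked vehicle, near but not on crosswalk," ++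
  " ignoring traffic signal, backward, forward, in car lane,...)" ++
  "\n" ++
  "8. Pedestrian awareness[gaze3d]: does the pedestrian notice the vehicle? " ++
  "\n" ++
  "" ++
  "\n" ++
  "Your output caption should be around 2-4 concises sentences."

def pvBody2 : String :=
  "[task:caption-" ++
  "JUDGEMENT" ++
  "]" ++
  "\n" ++
  "You are a traffic understanding model analyzing a traffic-related image, enriched with 3D scene reco" ++
  "nstructions and 3D gaze information. Focus on the behaviour and spatial context around the pedestria" ++
  "n (in the green box and/or a magenta-color arrow indicating pedestrian's gaze if there is one) and t" ++
  "he vechicle (in the red box). **Alert**: If the bounding boxes are not clear, focus on the pedestrai" ++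
  "n and the vehicle that nearest together." ++
  "\n" ++
  "Tags:[gaze3d] this tag will tell you that you can use the magenta-color arrow indicating pedestrian'" ++
  "s gaze (if there is one) as additional visual information to give out decision." ++
  "\n" ++
  "" ++
  "\n" ++
  "This is the **" ++
  "JUDGEMENT" ++
  "** phase" ++
  ". In principle, it is the moment from which environmental awareness is completed until the start of " ++
  "an action. The pedestrian should be fully awareness of the surrounding situation." ++
  "\n" ++
  "Use the following detailed aspects to guide your analysis:" ++
  "\n" ++
  "1. Body orientation[gaze3d]: diagonal, straight, or perpendicular to the vehicle; moving in the same" ++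
  " or opposite direction; to the left, right, or center. " ++
  "\n" ++
  "2. Position[gaze3d]: in front of, behind, or beside the vehicle; directly or diagonally; relative or" ++
  " adjacent." ++
  "\n" ++
  "3. Line of sight[gaze3d]: where the pedestrian is looking—direction of travel, crossing destination," ++
  " nearby vehicles, objects like phones or the road." ++
  "\n" ++
  "4. Visual state[gaze3d]: e.g., scanning the scene, eyes closed, attentive." ++
  "\n" ++
  "5. Action: e.g., walking, standing, crossing, squatting, falling, rushing, Collision, thrown back" ++
  "\n" ++
  "6. Direction and speed[gaze3d]: where and how fast the pedestrian is moving." ++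
  "\n" ++
  "7. Fine-grained action[gaze3d]: Focus on the action type(cross, fall, rush, travel), any Modifier / " ++
  "Location Detail(prohibited place, diagonally, near moving/parked vehicle, near but not on crosswalk," ++
  " ignoring traffic signal, backward, forward, in car lane,...)" ++
  "\n" ++
  "8. Pedestrian awareness[gaze3d]: does the pedestrian notice the vehicle? " ++
  "\n" ++
  "" ++
  "\n" ++
  "Your output caption should be around 2-4 concises sentences."

def pvBody3 : String :=
  "[task:caption-" ++
  "ACTION" ++
  "]" ++
  "\n" ++
  "You are a traffic understanding model analyzing a traffic-related image, enriched with 3D scene reco" ++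
  "nstructions and 3D gaze information. Focus on the behaviour and spatial context around the pedestria" ++
  "n (in the green box and/or a magenta-color arrow indicating pedestrian's gaze if there is one) and t" ++
  "he vechicle (in the red box). **Alert**: If the bounding boxes are not clear, focus on the pedestrai" ++
  "n and the vehicle that nearest together." ++
  "\n" ++
  "Tags:[gaze3d] this tag will tell you that you can use the magenta-color arrow indicating pedestrian'" ++
  "s gaze (if there is one) as additional visual information to give out decision." ++
  "\n" ++
  "" ++
  "\n" ++
  "This is the **" ++
  "ACTION" ++
  "** phase" ++
  ". In principle, this is the start moment of any part of the body of the pedestrian(eye and ears) up " ++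
  "to the time a result(e.g, collision) occurs. The action should be clear to recognize." ++
  "\n" ++
  "Use the following detailed aspects to guide your analysis:" ++
  "\n" ++
  "1. Body orientation[gaze3d]: diagonal, straight, or perpendicular to the vehicle; moving in the same" ++
  " or opposite direction; to the left, right, or center. " ++
  "\n" ++
  "2. Position[gaze3d]: in front of, behind, or beside the vehicle; directly or diagonally; relative or" ++
  " adjacent." ++
  "\n" ++
  "3. Line of sight[gaze3d]: where the pedestrian is looking—direction of travel, crossing destination," ++
  " nearby vehicles, objects like phones or the road." ++
  "\n" ++
  "4. Visual state[gaze3d]: e.g., scanning the scene, eyes closed, attentive." ++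
  "\n" ++
  "5. Action: e.g., walking, standing, crossing, squatting, falling, rushing, Collision, thrown back" ++
  "\n" ++
  "6. Direction and speed[gaze3d]: where and how fast the pedestrian is moving." ++
  "\n" ++
  "7. Fine-grained action[gaze3d]: Focus on the action type(cross, fall, rush, travel), any Modifier / " ++
  "Location Detail(prohibited place, diagonally, near moving/parked vehicle, near but not on crosswalk," ++
  " ignoring traffic signal, backward, forward, in car lane,...)" ++
  "\n" ++
  "8. Pedestrian awareness[gaze3d]: does the pedestrian notice the vehicle? " ++
  "\n" ++
  "" ++
  "\n" ++
  "Your output caption should be around 2-4 concises sentences."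

def pvBody4 : String :=
  "[task:caption-" ++
  "AVOIDANCE" ++
  "]" ++
  "\n" ++
  "You are a traffic understanding model analyzing a traffic-related image, enriched with 3D scene reco" ++
  "nstructions and 3D gaze information. Focus on the behaviour and spatial context around the pedestria" ++
  "n (in the green box and/or a magenta-color arrow indicating pedestrian's gaze if there is one) and t" ++
  "he vechicle (in the red box). **Alert**: If the bounding boxes are not clear, focus on the pedestrai" ++
  "n and the vehicle that nearest together." ++
  "\n" ++
  "Tags:[gaze3d] this tag will tell you that you can use the magenta-color arrow indicating pedestrian'" ++
  "s gaze (if there is one) as additional visual information to give out decision." ++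
  "\n" ++
  "" ++
  "\n" ++
  "This is the **" ++
  "AVOIDANCE" ++
  "** phase" ++
  ". In principle, this is the time after avoidability is clear until the time of avoidance happened or" ++
  " failure to avoid." ++
  "\n" ++
  "Use the following detailed aspects to guide your analysis:" ++
  "\n" ++
  "1. Body orientation[gaze3d]: diagonal, straight, or perpendicular to the vehicle; moving in the same" ++
  " or opposite direction; to the left, right, or center. " ++
  "\n" ++
  "2. Position[gaze3d]: in front of, behind, or beside the vehicle; directly or diagonally; relative or" ++
  " adjacent." ++
  "\n" ++
  "3. Line of sight[gaze3d]: where the pedestrian is looking—direction of travel, crossing destination," ++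
  " nearby vehicles, objects like phones or the road." ++
  "\n" ++
  "4. Visual state[gaze3d]: e.g., scanning the scene, eyes closed, attentive." ++
  "\n" ++
  "5. Action: e.g., walking, standing, crossing, squatting, falling, rushing, Collision, thrown back" ++
  "\n" ++
  "6. Direction and speed[gaze3d]: where and how fast the pedestrian is moving." ++
  "\n" ++
  "7. Fine-grained action[gaze3d]: Focus on the action type(cross, fall, rush, travel), any Modifier / " ++
  "Location Detail(prohibited place, diagonally, near moving/parked vehicle, near but not on crosswalk," ++
  " ignoring traffic signal, backward, forward, in car lane,...)" ++
  "\n" ++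
  "8. Pedestrian awareness[gaze3d]: does the pedestrian notice the vehicle? " ++
  "\n" ++
  "" ++
  "\n" ++
  "Your output caption should be around 2-4 concises sentences." ++
  " "

def get_prompt_temporal_pedestrian (image_len : Int) (phase : String) : String :=
  let prompt : String := ""
  let prompt : String :=
    if image_len > 0 then
      (PySem.List.pyRange 0 image_len 1).foldl (fun p _ => p ++ "<image>\n") prompt
    else prompt
  if phase == "0" then prompt ++ pvBody0
  else if phase == "1" then prompt ++ pvBody1
  else if phase == "2" then prompt ++ pvBody2
  else if phase == "3" then prompt ++ pvBody3
  else prompt ++ pvBody4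

-- ===== PORT B =====
def pvCommon : List String := [
    "You are a traffic understanding model analyzing a traffic-related image, enriched with 3D scene reco" ++
    "nstructions and 3D gaze information. Focus on the behaviour and spatial context around the pedestria" ++
    "n (in the green box and/or a magenta-color arrow indicating pedestrian's gaze if there is one) and t" ++
    "he vechicle (in the red box). **Alert**: If the bounding boxes are not clear, focus on the pedestrai" ++
    "n and the vehicle that nearest together.",
    "Tags:[gaze3d] this tag will tell you that you can use the magenta-color arrow indicating pedestrian'" ++
    "s gaze (if there is one) as additional visual information to give out decision."]

def pvAspects : List String := [
    "Use the following detailed aspects to guide your analysis:",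
    "1. Body orientation[gaze3d]: diagonal, straight, or perpendicular to the vehicle; moving in the same" ++
    " or opposite direction; to the left, right, or center. ",
    "2. Position[gaze3d]: in front of, behind, or beside the vehicle; directly or diagonally; relative or" ++
    " adjacent.",
    "3. Line of sight[gaze3d]: where the pedestrian is looking—direction of travel, crossing destination," ++
    " nearby vehicles, objects like phones or the road.",
    "4. Visual state[gaze3d]: e.g., scanning the scene, eyes closed, attentive.",
    "5. Action: e.g., walking, standing, crossing, squatting, falling, rushing, Collision, thrown back",
    "6. Direction and speed[gaze3d]: where and how fast the pedestrian is moving.",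
    "7. Fine-grained action[gaze3d]: Focus on the action type(cross, fall, rush, travel), any Modifier / " ++
    "Location Detail(prohibited place, diagonally, near moving/parked vehicle, near but not on crosswalk," ++
    " ignoring traffic signal, backward, forward, in car lane,...)",
    "8. Pedestrian awareness[gaze3d]: does the pedestrian notice the vehicle? "]

def pvFinal : String :=
  "Your output caption should be around 2-4 concises sentences."

def pvPhases : PySem.Dict String (String × String × String) := PySem.Dict.ofList [
  ("0", ("PRERECOGNITION",
    ", where the timing is before the start of an environment awareness(crosswalks, traffic signals, vehi" ++
    "cles, etc). ", "")),
  ("1", ("RECOGNITION",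
    ", where the timing is from the start of the environment awareness(crosswalks, traffic signals, vehic" ++
    "les, etc), until a judgement is made. There should be some awareness clues of the pedestrian.", "")),
  ("2", ("JUDGEMENT",
    ". In principle, it is the moment from which environmental awareness is completed until the start of " ++
    "an action. The pedestrian should be fully awareness of the surrounding situation.", "")),
  ("3", ("ACTION",
    ". In principle, this is the start moment of any part of the body of the pedestrian(eye and ears) up " ++
    "to the time a result(e.g, collision) occurs. The action should be clear to recognize.", ""))]

def pvDefault : String × String × String := ("AVOIDANCE",
  ". In principle, this is the time after avoidability is clear until the time of avoidance happened or" ++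
  " failure to avoid.", " ")

-- the 16 body lines: fixed table with the three phase-dependent slots filled in
def pvLines (phase : String) : List String :=
  let ldt := (PySem.Dict.get? pvPhases phase).getD pvDefault
  ("[task:caption-" ++ ldt.1 ++ "]") ::
    (pvCommon ++ ("" :: ("This is the **" ++ ldt.1 ++ "** phase" ++ ldt.2.1) :: pvAspects
      ++ ["", pvFinal ++ ldt.2.2]))

-- "\n".join over the flat line list; ["<image>"] * image_len is empty for image_len ≤ 0
def get_prompt_temporal_pedestrian_alt (image_len : Int) (phase : String) : String :=
  PySem.Str.join "\n" (List.replicate image_len.toNat "<image>" ++ pvLines phase)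

-- ===== PRECONDITION & SPEC =====
def Spec_get_prompt_temporal_pedestrian (image_len : Int) (phase : String) (out : String) : Prop := out = get_prompt_temporal_pedestrian_alt image_len phase
instance (image_len : Int) (phase : String) (out : String) : Decidable (Spec_get_prompt_temporal_pedestrian image_len phase out) := by unfold Spec_get_prompt_temporal_pedestrian; infer_instance

-- ===== CLAIM =====
def Claim_equal_get_prompt_temporal_pedestrian : Prop := ∀ (image_len : Int) (phase : String), Dom_get_prompt_temporal_pedestrian image_len phase → Spec_get_prompt_temporal_pedestrian image_len phase (get_prompt_temporal_pedestrian image_len phase)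

-- ===== LEMMAS AND PROOFS =====
-- A's accumulation loop produces "<image>\n" * n
theorem pv_foldl_str_shift (l : List String) (a : String) :
    List.foldl (fun r s => r ++ s) a l = a ++ List.foldl (fun r s => r ++ s) "" l := by
  induction l generalizing a with
  | nil => simp
  | cons x xs ih =>
      simp only [List.foldl_cons]
      rw [ih (a ++ x), ih ("" ++ x)]
      simp [String.append_assoc]

theorem pv_foldl_img (l : List Int) (acc : String) :
    l.foldl (fun p _ => p ++ "<image>\n") acc = acc ++ String.join (List.replicate l.length "<image>\n") := by
  induction l generalizing acc with
  | nil => simp [String.join]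
  | cons x xs ih =>
      simp only [List.foldl_cons, ih, List.length_cons, List.replicate_succ, String.join]
      rw [pv_foldl_str_shift (List.replicate xs.length "<image>\n") ("" ++ "<image>\n")]
      simp [String.append_assoc]

theorem pv_prefix_eq (n : Int) :
    (if n > 0 then (PySem.List.pyRange 0 n 1).foldl (fun p _ => p ++ "<image>\n") "" else "")
      = String.join (List.replicate n.toNat "<image>\n") := by
  split_ifs with h
  · rw [pv_foldl_img]
    simp [PySem.List.length_pyRange_one]
  · have : n.toNat = 0 := by omega
    simp [this, String.join]

-- "\n".join peels its first element off
theorem pv_join_cons (a b : String) (M : List String) :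
    PySem.Str.join "\n" (a :: b :: M) = a ++ "\n" ++ PySem.Str.join "\n" (b :: M) := by
  apply String.toList_inj.mp
  simp [PySem.Str.join, PySem.Chars.join_cons_cons]

theorem pv_join_one (a : String) : PySem.Str.join "\n" [a] = a := by
  apply String.toList_inj.mp
  simp [PySem.Str.join]

theorem pv_join_cons' (a : String) (M : List String) (h : M ≠ []) :
    PySem.Str.join "\n" (a :: M) = a ++ "\n" ++ PySem.Str.join "\n" M := by
  cases M with
  | nil => exact absurd rfl h
  | cons b l => exact pv_join_cons a b l

-- the "<image>" lines of the join ARE the "<image>\n" prefix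
theorem pv_join_rep (k : Nat) (L : List String) (h : L ≠ []) :
    PySem.Str.join "\n" (List.replicate k "<image>" ++ L)
      = String.join (List.replicate k "<image>\n") ++ PySem.Str.join "\n" L := by
  induction k with
  | zero => simp [String.join]
  | succ k ih =>
      rw [List.replicate_succ, List.cons_append,
        pv_join_cons' _ _ (by simp [h]), ih,
        List.replicate_succ]
      simp only [String.join, List.foldl_cons]
      rw [pv_foldl_str_shift _ ("" ++ "<image>\n")]
      rw [show ("<image>" ++ "\n" : String) = "<image>\n" by decide]
      simp [String.append_assoc]

theorem pvLines_ne_nil (phase : String) : pvLines phase ≠ [] := by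
  simp [pvLines]

theorem pvPhases_eq : pvPhases = PySem.Dict.mk [
  ("0", ("PRERECOGNITION",
    ", where the timing is before the start of an environment awareness(crosswalks, traffic signals, vehi" ++
    "cles, etc). ", "")),
  ("1", ("RECOGNITION",
    ", where the timing is from the start of the environment awareness(crosswalks, traffic signals, vehic" ++
    "les, etc), until a judgement is made. There should be some awareness clues of the pedestrian.", "")),
  ("2", ("JUDGEMENT",
    ". In principle, it is the moment from which environmental awareness is completed until the start of " ++
    "an action. The pedestrian should be fully awareness of the surrounding situation.", "")),
  ("3", ("ACTION",
    ". In principle, this is the start moment of any part of the body of the pedestrian(eye and ears) up " ++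
    "to the time a result(e.g, collision) occurs. The action should be clear to recognize.", ""))] := by rfl

theorem pv_get_none (phase : String) (h0 : phase ≠ "0") (h1 : phase ≠ "1")
    (h2 : phase ≠ "2") (h3 : phase ≠ "3") :
    PySem.Dict.get? pvPhases phase = none := by
  rw [pvPhases_eq]
  simp [beq_iff_eq, Ne.symm h0, Ne.symm h1, Ne.symm h2, Ne.symm h3, PySem.Dict.get?]

-- ===== VERDICT =====
set_option maxRecDepth 10000 in
set_option maxHeartbeats 4000000 in
theorem get_prompt_temporal_pedestrian_spec : Claim_equal_get_prompt_temporal_pedestrian := by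
  intro n phase _
  simp only [Spec_get_prompt_temporal_pedestrian, get_prompt_temporal_pedestrian,
    get_prompt_temporal_pedestrian_alt]
  rw [pv_prefix_eq, pv_join_rep _ _ (pvLines_ne_nil phase)]
  generalize String.join (List.replicate n.toNat "<image>\n") = s
  by_cases h0 : phase = "0"
  · subst h0
    rw [
      if_pos (show (("0":String) == "0") = true by decide)]
    refine congrArg (fun t => s ++ t) ?_
    simp only [pvLines, pvPhases_eq, PySem.Dict.get?_mk_cons, pvCommon, pvAspects, pvFinal,
      pvBody0, pvDefault, List.cons_append, List.nil_append]
    norm_num [pv_join_cons, pv_join_one, String.append_assoc]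
  by_cases h1 : phase = "1"
  · subst h1
    rw [
      if_neg (show ¬ (("1":String) == "0") = true by decide),
      if_pos (show (("1":String) == "1") = true by decide)]
    refine congrArg (fun t => s ++ t) ?_
    simp only [pvLines, pvPhases_eq, PySem.Dict.get?_mk_cons, pvCommon, pvAspects, pvFinal,
      pvBody1, pvDefault, List.cons_append, List.nil_append]
    norm_num [pv_join_cons, pv_join_one, String.append_assoc,
      (eq_false (by decide : ¬ (("0":String) = "1")))]
  by_cases h2 : phase = "2"
  · subst h2
    rw [
      if_neg (show ¬ (("2":String) == "0") = true by decide),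
      if_neg (show ¬ (("2":String) == "1") = true by decide),
      if_pos (show (("2":String) == "2") = true by decide)]
    refine congrArg (fun t => s ++ t) ?_
    simp only [pvLines, pvPhases_eq, PySem.Dict.get?_mk_cons, pvCommon, pvAspects, pvFinal,
      pvBody2, pvDefault, List.cons_append, List.nil_append]
    norm_num [pv_join_cons, pv_join_one, String.append_assoc,
      (eq_false (by decide : ¬ (("0":String) = "2"))), (eq_false (by decide : ¬ (("1":String) = "2")))]
  by_cases h3 : phase = "3"
  · subst h3
    rw [
      if_neg (show ¬ (("3":String) == "0") = true by decide),
      if_neg (show ¬ (("3":String) == "1") = true by decide),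
      if_neg (show ¬ (("3":String) == "2") = true by decide),
      if_pos (show (("3":String) == "3") = true by decide)]
    refine congrArg (fun t => s ++ t) ?_
    simp only [pvLines, pvPhases_eq, PySem.Dict.get?_mk_cons, pvCommon, pvAspects, pvFinal,
      pvBody3, pvDefault, List.cons_append, List.nil_append]
    norm_num [pv_join_cons, pv_join_one, String.append_assoc,
      (eq_false (by decide : ¬ (("0":String) = "3"))), (eq_false (by decide : ¬ (("1":String) = "3"))), (eq_false (by decide : ¬ (("2":String) = "3")))]
  · rw [if_neg (show ¬ ((phase == "0") = true) by simp [h0]),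
      if_neg (show ¬ ((phase == "1") = true) by simp [h1]),
      if_neg (show ¬ ((phase == "2") = true) by simp [h2]),
      if_neg (show ¬ ((phase == "3") = true) by simp [h3])]
    refine congrArg (fun t => s ++ t) ?_
    have hl : PySem.Dict.get? pvPhases phase = none := pv_get_none phase h0 h1 h2 h3
    simp only [pvLines, hl, Option.getD_none, pvDefault, pvCommon, pvAspects, pvFinal,
      pvBody4, List.cons_append, List.nil_append]
    norm_num [pv_join_cons, pv_join_one, String.append_assoc]
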